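-- pv_equiv track=rewrite | github.com/ecagri/GTU-HOMEWORKS | CSE 454 Data Mining/Project/preprocessing.py | identicalData
-- ===== SOURCE A (Python) =====
-- def identicalData(dataset): # Finds identical data #
--     not_uniques = []
--     for i in range(len(dataset)):
--         if(i not in not_uniques):
--             for j in range(i + 1, len(dataset)):
--                 if(dataset[i] == dataset[j]):
--                     not_uniques.append(j)
--     return not_uniques
-- ===== SOURCE B (Python) =====
-- def identicalData(dataset):
--     # Hash each row (as a tuple) to the list of its indices in one pass,
--     # then emit, per first-occurrence order, every index after the first.
--     groups = {}
--     for i, row in enumerate(dataset):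
--         groups.setdefault(tuple(row), []).append(i)
--     return [j for idxs in groups.values() for j in idxs[1:]]
-- ===== Notes on version B (the rewrite author's own statement) =====
-- stated objective: alternative
-- what changed: Replaces the nested index scan (with a membership test on the growing result list) by a single pass that hashes each row to its list of indices, then flattens each group's indices after the first in first-occurrence order.
import Mathlib
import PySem

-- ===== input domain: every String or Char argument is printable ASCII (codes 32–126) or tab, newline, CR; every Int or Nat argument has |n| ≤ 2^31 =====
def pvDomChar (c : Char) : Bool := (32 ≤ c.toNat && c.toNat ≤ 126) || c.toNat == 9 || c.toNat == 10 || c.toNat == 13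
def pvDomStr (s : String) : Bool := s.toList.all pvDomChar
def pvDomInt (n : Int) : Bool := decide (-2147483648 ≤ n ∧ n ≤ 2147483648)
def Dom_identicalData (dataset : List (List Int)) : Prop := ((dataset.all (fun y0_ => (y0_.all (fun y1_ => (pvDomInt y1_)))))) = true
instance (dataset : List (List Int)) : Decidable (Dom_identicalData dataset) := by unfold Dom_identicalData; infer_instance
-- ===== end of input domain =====

-- B groups each row to its index list in one hashed pass instead of A's nested index scan; equal output proved on all inputs.

-- ===== PORT A =====
def identicalData (dataset : List (List Int)) : List Int :=
  (PySem.List.pyRange 0 (PySem.List.len dataset) 1).foldl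
    (fun not_uniques i =>
      if not_uniques.contains i then not_uniques
      else
        (PySem.List.pyRange (i + 1) (PySem.List.len dataset) 1).foldl
          (fun acc j =>
            if PySem.List.pyGetD dataset i [] == PySem.List.pyGetD dataset j [] then acc ++ [j]
            else acc)
          not_uniques)
    []

-- ===== PORT B =====
def identicalData_alt (dataset : List (List Int)) : List Int :=
  let groups : PySem.Dict (List Int) (List Int) :=
    (PySem.List.enumerate dataset).foldl
      (fun g p => g.modify p.2 [] (fun l => l ++ [p.1])) PySem.Dict.empty
  (PySem.Dict.values groups).flatMap (fun idxs => PySem.List.slice idxs (some 1) none)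

-- ===== PRECONDITION & SPEC =====
def Spec_identicalData (dataset : List (List Int)) (out : List Int) : Prop := out = identicalData_alt dataset
instance (dataset : List (List Int)) (out : List Int) : Decidable (Spec_identicalData dataset out) := by unfold Spec_identicalData; infer_instance

-- ===== CLAIM (what is proved, stated in full; the proofs are below) =====
def Claim_equal_identicalData : Prop := ∀ (dataset : List (List Int)), Dom_identicalData dataset → Spec_identicalData dataset (identicalData dataset)

-- ===== LEMMAS AND PROOFS =====

-- row at index i (as A reads it; in-range throughout)
def rowD (ds : List (List Int)) (i : Int) : List Int := PySem.List.pyGetD ds i []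
-- indices j > i with the same row as i (what A's inner loop appends for a kept i)
def dupsD (ds : List (List Int)) (i : Int) : List Int :=
  (PySem.List.pyRange (i + 1) (PySem.List.len ds) 1).filter (fun j => rowD ds i == rowD ds j)
-- i is a first occurrence of its row
def firstI (ds : List (List Int)) (i : Int) : Bool :=
  !((PySem.List.pyRange 0 i 1).any (fun i' => rowD ds i' == rowD ds i))
def firstsD (ds : List (List Int)) (m : Int) : List Int :=
  (PySem.List.pyRange 0 m 1).filter (firstI ds)
def FlD (ds : List (List Int)) (m : Int) : List Int := (firstsD ds m).flatMap (dupsD ds)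

theorem exists_first (ds : List (List Int)) :
    ∀ k : Nat, firstI ds (k : Int) = false →
      ∃ f : Nat, f < k ∧ firstI ds (f : Int) = true ∧ rowD ds (f : Int) = rowD ds (k : Int) := by
  intro k
  induction k using Nat.strong_induction_on with
  | _ k IH =>
    intro hk
    unfold firstI at hk
    simp only [Bool.not_eq_false', List.any_eq_true] at hk
    obtain ⟨i', hi'mem, hrow⟩ := hk
    rw [PySem.List.mem_pyRange_one] at hi'mem
    have hrow' : rowD ds i' = rowD ds (k : Int) := by exact_mod_cast eq_of_beq hrow
    have hm : ((i'.toNat : Nat) : Int) = i' := Int.toNat_of_nonneg hi'mem.1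
    have hmk : i'.toNat < k := by omega
    by_cases hf : firstI ds ((i'.toNat : Nat) : Int) = true
    · exact ⟨i'.toNat, hmk, hf, by rw [hm]; exact hrow'⟩
    · obtain ⟨f, hf1, hf2, hf3⟩ := IH i'.toNat hmk (by simpa using hf)
      exact ⟨f, by omega, hf2, by rw [hf3, hm]; exact hrow'⟩

theorem mem_FlD (ds : List (List Int)) (k : Nat) (hk : k < ds.length) :
    ((k : Int) ∈ FlD ds (k : Int)) ↔ firstI ds (k : Int) = false := by
  constructor
  · intro h
    rw [FlD, List.mem_flatMap] at h
    obtain ⟨f, hfm, hkd⟩ := h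
    rw [firstsD, List.mem_filter, PySem.List.mem_pyRange_one] at hfm
    rw [dupsD, List.mem_filter, PySem.List.mem_pyRange_one] at hkd
    unfold firstI
    simp only [Bool.not_eq_false', List.any_eq_true]
    exact ⟨f, by rw [PySem.List.mem_pyRange_one]; exact hfm.1, hkd.2⟩
  · intro h
    obtain ⟨f, hf1, hf2, hf3⟩ := exists_first ds k h
    rw [FlD, List.mem_flatMap]
    refine ⟨(f : Int), ?_, ?_⟩
    · rw [firstsD, List.mem_filter, PySem.List.mem_pyRange_one]
      exact ⟨⟨by positivity, by exact_mod_cast hf1⟩, hf2⟩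
    · rw [dupsD, List.mem_filter, PySem.List.mem_pyRange_one]
      refine ⟨⟨by exact_mod_cast hf1, ?_⟩, beq_iff_eq.mpr hf3⟩
      simp only [PySem.List.len_eq]
      exact_mod_cast hk

theorem A_inv (ds : List (List Int)) (k : Nat) (hk : k ≤ ds.length) :
    (PySem.List.pyRange 0 (k : Int) 1).foldl
      (fun not_uniques i =>
        if not_uniques.contains i then not_uniques
        else
          (PySem.List.pyRange (i + 1) (PySem.List.len ds) 1).foldl
            (fun acc j =>
              if PySem.List.pyGetD ds i [] == PySem.List.pyGetD ds j [] then acc ++ [j]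
              else acc)
            not_uniques)
      [] = FlD ds (k : Int) := by
  induction k with
  | zero =>
    simp [FlD, firstsD, PySem.List.pyRange_one_eq_nil (by norm_num : (0:Int) ≤ 0)]
  | succ k IH =>
    have hkn : k < ds.length := by omega
    have hinner : ∀ acc : List Int,
        (PySem.List.pyRange ((k : Int) + 1) (PySem.List.len ds) 1).foldl
          (fun acc j =>
            if PySem.List.pyGetD ds (k : Int) [] == PySem.List.pyGetD ds j [] then acc ++ [j]
            else acc) acc = acc ++ dupsD ds (k : Int) := by
      intro acc
      rw [dupsD]
      have := PySem.List.foldl_append_if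
        (p := fun j => rowD ds (k : Int) == rowD ds j) (f := fun j : Int => j)
        (l := PySem.List.pyRange ((k : Int) + 1) (PySem.List.len ds) 1) (acc := acc)
      simpa [rowD] using this
    have hc : (((k + 1 : Nat)) : Int) = (k : Int) + 1 := by push_cast; ring
    rw [hc, PySem.List.pyRange_one_succ_right (by positivity), List.foldl_append, IH (by omega)]
    simp only [List.foldl_cons, List.foldl_nil]
    by_cases hfi : firstI ds (k : Int) = true
    · have hnot : ¬ ((k : Int) ∈ FlD ds (k : Int)) := by
        rw [mem_FlD ds k hkn]; simp [hfi]
      have hcont : (FlD ds (k : Int)).contains (k : Int) = false := by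
        simpa using hnot
      rw [hcont]
      simp only [Bool.false_eq_true, if_false]
      rw [hinner, FlD, FlD, firstsD, firstsD,
        PySem.List.pyRange_one_succ_right (by positivity : (0:Int) ≤ (k:Int)),
        List.filter_append, List.flatMap_append]
      simp [hfi]
    · have hmem : (k : Int) ∈ FlD ds (k : Int) :=
        (mem_FlD ds k hkn).mpr (by simpa using hfi)
      have hcont : (FlD ds (k : Int)).contains (k : Int) = true := by
        simpa using hmem
      rw [hcont]
      simp only [if_true]
      rw [FlD, FlD, firstsD, firstsD,
        PySem.List.pyRange_one_succ_right (by positivity : (0:Int) ≤ (k:Int)),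
        List.filter_append, List.flatMap_append]
      simp [hfi]

theorem B_shape (ds : List (List Int)) :
    identicalData_alt ds =
      (PySem.Set.ofList ds).flatMap
        (fun r => ((PySem.List.pyRange 0 (PySem.List.len ds) 1).filter (fun j => rowD ds j == r)).tail) := by
  have hL : (PySem.List.enumerate ds).foldl
      (fun g p => g.modify p.2 [] (fun l => l ++ [p.1])) PySem.Dict.empty
      = ((PySem.List.pyRange 0 (PySem.List.len ds) 1).map (fun j => (rowD ds j, j))).foldl
          (fun g p => g.modify p.1 [] (fun l => l ++ [p.2])) PySem.Dict.empty := by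
    rw [PySem.List.enumerate_eq_map_pyRange ds [], List.foldl_map, List.foldl_map]
    rfl
  have hkeys : (((PySem.List.pyRange 0 (PySem.List.len ds) 1).map (fun j => (rowD ds j, j))).foldl
      (fun g p => g.modify p.1 [] (fun l => l ++ [p.2])) PySem.Dict.empty).keys
      = PySem.Set.ofList ds := by
    rw [PySem.Dict.keys_foldl_modify_key _ Prod.fst [] (fun _ p => (fun l => l ++ [p.2]))]
    rw [List.map_map]
    have : (Prod.fst ∘ fun j => (rowD ds j, j)) = fun j => PySem.List.pyGetD ds j [] := rfl
    rw [this, PySem.List.map_pyGetD_pyRange_zero, PySem.Set.ofList_eq_foldl]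
    rfl
  have hgetD : ∀ r, (((PySem.List.pyRange 0 (PySem.List.len ds) 1).map (fun j => (rowD ds j, j))).foldl
      (fun g p => g.modify p.1 [] (fun l => l ++ [p.2])) PySem.Dict.empty).getD r []
      = (PySem.List.pyRange 0 (PySem.List.len ds) 1).filter (fun j => rowD ds j == r) := by
    intro r
    rw [PySem.Dict.getD_foldl_modify_append]
    rw [List.filter_map, List.map_map]
    simp [Function.comp_def]
  simp only [identicalData_alt, hL]
  rw [PySem.Dict.values_eq_map_keys _ (by rw [hkeys]; exact PySem.Set.nodup_ofList ds) []]
  rw [hkeys, List.flatMap_map]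
  refine List.flatMap_congr (fun r _ => ?_)
  rw [hgetD r, PySem.List.slice_from_one]


theorem rowD_append (xs : List (List Int)) (x : List Int) (i : Int) (h0 : 0 ≤ i)
    (h : i < xs.length) : rowD (xs ++ [x]) i = rowD xs i := by
  rw [rowD, rowD, PySem.List.pyGetD_of_nonneg _ _ h0, PySem.List.pyGetD_of_nonneg _ _ h0,
    List.getD_append _ _ _ _ (by omega)]

theorem rowD_last (xs : List (List Int)) (x : List Int) :
    rowD (xs ++ [x]) (xs.length : Int) = x := by
  rw [rowD, PySem.List.pyGetD_natCast]
  simp [List.getD]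

theorem firstI_append (xs : List (List Int)) (x : List Int) (i : Int) (h0 : 0 ≤ i)
    (h : i < xs.length) : firstI (xs ++ [x]) i = firstI xs i := by
  have hcg : ∀ i' ∈ PySem.List.pyRange 0 i 1,
      (rowD (xs ++ [x]) i' == rowD (xs ++ [x]) i) = (rowD xs i' == rowD xs i) := by
    intro i' hm
    rw [PySem.List.mem_pyRange_one] at hm
    rw [rowD_append xs x i' hm.1 (by omega), rowD_append xs x i h0 h]
  rw [firstI, firstI]
  congr 1
  rw [Bool.eq_iff_iff, List.any_eq_true, List.any_eq_true]
  constructor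
  · rintro ⟨i', hm, hp⟩; exact ⟨i', hm, by rw [← hcg i' hm]; exact hp⟩
  · rintro ⟨i', hm, hp⟩; exact ⟨i', hm, by rw [hcg i' hm]; exact hp⟩

theorem firstI_last (xs : List (List Int)) (x : List Int) :
    firstI (xs ++ [x]) (xs.length : Int) = !(decide (x ∈ xs)) := by
  rw [firstI]
  congr 1
  by_cases hx : x ∈ xs
  · simp only [hx, decide_true]
    obtain ⟨k, hk, he⟩ := List.mem_iff_getElem.mp hx
    rw [List.any_eq_true]
    refine ⟨(k : Int), by rw [PySem.List.mem_pyRange_one]; constructor <;> [positivity; exact_mod_cast hk], ?_⟩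
    rw [rowD_append xs x (k : Int) (by positivity) (by exact_mod_cast hk), rowD_last]
    rw [beq_iff_eq, rowD, PySem.List.pyGetD_natCast, List.getD_eq_getElem?_getD]
    simp [List.getElem?_eq_getElem hk, he]
  · simp only [hx, decide_false]
    rw [List.any_eq_false]
    intro i' hm
    rw [PySem.List.mem_pyRange_one] at hm
    rw [rowD_append xs x i' hm.1 hm.2, rowD_last, beq_iff_eq, rowD,
      PySem.List.pyGetD_of_nonneg _ _ hm.1]
    intro hctr
    apply hx
    rw [← hctr, List.getD_eq_getElem?_getD]
    have hlt : i'.toNat < xs.length := by omega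
    simp [List.getElem?_eq_getElem hlt]

theorem ofList_eq_map_firsts (ds : List (List Int)) :
    PySem.Set.ofList ds = (firstsD ds (PySem.List.len ds)).map (rowD ds) := by
  induction ds using List.reverseRecOn with
  | nil =>
    simp [PySem.Set.ofList_eq_foldl, firstsD,
      PySem.List.pyRange_one_eq_nil (le_refl (0 : Int))]
  | append_singleton xs x IH =>
    have hn : PySem.List.len (xs ++ [x]) = (xs.length : Int) + 1 := by
      simp [PySem.List.len_eq]
    have hadd : PySem.Set.ofList (xs ++ [x]) = PySem.Set.add (PySem.Set.ofList xs) x := by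
      simp [PySem.Set.ofList_eq_foldl]
    rw [firstsD, hn, PySem.List.pyRange_one_succ_right (by positivity),
      List.filter_append, List.map_append]
    simp only [PySem.List.len_eq, firstsD] at IH
    have h1 : ((PySem.List.pyRange 0 (xs.length : Int) 1).filter (firstI (xs ++ [x]))).map
        (rowD (xs ++ [x])) = PySem.Set.ofList xs := by
      have hfil : (PySem.List.pyRange 0 (xs.length : Int) 1).filter (firstI (xs ++ [x]))
          = (PySem.List.pyRange 0 (xs.length : Int) 1).filter (firstI xs) :=
        List.filter_congr (fun i hm => by
          rw [PySem.List.mem_pyRange_one] at hm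
          exact firstI_append xs x i hm.1 hm.2)
      rw [hfil]
      have hmap : List.map (rowD (xs ++ [x]))
          ((PySem.List.pyRange 0 (xs.length : Int) 1).filter (firstI xs))
          = List.map (rowD xs) ((PySem.List.pyRange 0 (xs.length : Int) 1).filter (firstI xs)) :=
        List.map_congr_left (fun i hm => by
          have hm' := (List.mem_filter.mp hm).1
          rw [PySem.List.mem_pyRange_one] at hm'
          exact rowD_append xs x i hm'.1 hm'.2)
      rw [hmap]
      exact IH.symm
    rw [h1, hadd]
    by_cases hx : x ∈ xs
    · have : firstI (xs ++ [x]) (xs.length : Int) = false := by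
        rw [firstI_last]; simp [hx]
      simp only [List.filter_cons, List.filter_nil, this]
      simp [PySem.Set.add, PySem.Set.mem_ofList, hx]
    · have : firstI (xs ++ [x]) (xs.length : Int) = true := by
        rw [firstI_last]; simp [hx]
      simp only [List.filter_cons, List.filter_nil, this]
      simp only [if_true]
      rw [List.map_cons, List.map_nil, rowD_last]
      simp [PySem.Set.add, PySem.Set.mem_ofList, hx]

theorem filter_eq_cons_dups (ds : List (List Int)) (f : Nat) (hf : f < ds.length)
    (hfirst : firstI ds (f : Int) = true) :
    (PySem.List.pyRange 0 (PySem.List.len ds) 1).filter (fun j => rowD ds j == rowD ds (f : Int)) =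
      (f : Int) :: dupsD ds (f : Int) := by
  rw [dupsD]
  simp only [PySem.List.len_eq]
  unfold firstI at hfirst
  simp only [Bool.not_eq_true'] at hfirst
  rw [List.any_eq_false] at hfirst
  rw [PySem.List.pyRange_one_append 0 (f : Int) (ds.length : Int) (by positivity)
    (by exact_mod_cast le_of_lt hf)]
  rw [PySem.List.pyRange_one_cons (a := (f : Int)) (b := (ds.length : Int))
    (by exact_mod_cast hf)]
  rw [List.filter_append, List.filter_cons]
  have h0 : (PySem.List.pyRange 0 (f : Int) 1).filter (fun j => rowD ds j == rowD ds (f : Int)) = [] :=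
    List.filter_eq_nil_iff.mpr (fun j hj => by
      have := hfirst j hj
      simpa [Bool.beq_comm] using this)
  rw [h0]
  simp only [beq_self_eq_true, if_true, List.nil_append]
  congr 1
  exact List.filter_congr (fun j hj => Bool.beq_comm)

-- ===== VERDICT (by name: the statement is the Claim_ definition above) =====
theorem identicalData_spec : Claim_equal_identicalData := by
  intro ds _
  unfold Spec_identicalData
  have hinv := A_inv ds ds.length (le_refl _)
  rw [identicalData, B_shape, ofList_eq_map_firsts, List.flatMap_map]
  simp only [PySem.List.len_eq] at hinv ⊢
  rw [hinv, FlD]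
  refine List.flatMap_congr (fun f hm => ?_)
  rw [firstsD, List.mem_filter] at hm
  simp only [PySem.List.mem_pyRange_one] at hm
  obtain ⟨⟨hf0, hfn⟩, hfirst⟩ := hm
  have hfc : ((f.toNat : Nat) : Int) = f := Int.toNat_of_nonneg hf0
  have hkey := filter_eq_cons_dups ds f.toNat (by omega) (by rw [hfc]; exact hfirst)
  simp only [PySem.List.len_eq, hfc] at hkey
  rw [hkey, List.tail_cons]
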